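-- pv_equiv track=rewrite | github.com/openforcefield/openff-toolkit | openforcefield/utils/graph.py | dependants_to_dependencies
-- ===== SOURCE A (Python) =====
-- def dependants_to_dependencies(graph):
--     """Inverts a dependant's graph to yield a dependency graph.
--
--     Notes
--     -----
--     The graph must be directed and acyclic.
--
--     Parameters
--     ----------
--     graph: dict(str, list(str))
--         The graph to invert. Each key in the dictionary represents a node in the graph, and each
--         string in the value list represents a node which depends on the node defined by the key.
--
--     Returns
--     -------
--     dict(str, list(str))
--         The inverted graph. Each key in the dictionary represents a node in the graph, and each
--         string in the value list represents a node which the node defined by the key depends on.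
--     """
--
--     dependencies = {}
--
--     for node in graph:
--
--         if node not in dependencies:
--             dependencies[node] = []
--
--         for dependant in graph[node]:
--
--             if dependant not in dependencies:
--                 dependencies[dependant] = []
--
--             if node not in dependencies[dependant]:
--                 dependencies[dependant].append(node)
--
--     return dependencies
-- ===== SOURCE B (Python) =====
-- def dependants_to_dependencies(graph):
--     nodes = dict.fromkeys(n for node in graph for n in (node, *graph[node]))
--     return {target: [n for n in graph if target in graph[n]] for target in nodes}
-- ===== Notes on version B (the rewrite author's own statement) =====
-- stated objective: simpler
-- what changed: Instead of one forward pass that incrementally creates keys and pushes reverse edges into the accumulator, B first collects the full node set (keys plus all dependants, first-appearance order) and then computes each node's dependency list by an independent per-target scan of the graph; this is shorter and clearer but does repeated scans, so it is slower on large graphs.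
import Mathlib
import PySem

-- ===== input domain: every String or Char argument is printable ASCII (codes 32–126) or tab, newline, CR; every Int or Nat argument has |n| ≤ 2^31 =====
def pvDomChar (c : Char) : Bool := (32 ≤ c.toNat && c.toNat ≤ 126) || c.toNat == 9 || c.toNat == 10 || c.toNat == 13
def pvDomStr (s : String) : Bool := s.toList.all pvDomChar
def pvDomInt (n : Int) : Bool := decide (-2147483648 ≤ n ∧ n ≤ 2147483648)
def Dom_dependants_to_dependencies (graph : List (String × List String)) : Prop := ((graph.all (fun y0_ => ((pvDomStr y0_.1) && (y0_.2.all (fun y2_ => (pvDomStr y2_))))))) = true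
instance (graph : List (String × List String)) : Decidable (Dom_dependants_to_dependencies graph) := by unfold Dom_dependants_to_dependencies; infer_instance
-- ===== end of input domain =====

-- B inverts the dependants graph by collecting the full node set first and then doing an
-- independent per-target scan of the graph, instead of A's single forward pass that
-- incrementally creates keys and pushes reverse edges (objective: simpler decomposition).


-- ===== PORT A =====
-- `if dependant not in dependencies: dependencies[dependant] = []` / append step, on the
-- association list representing the Python dict (insertion order, modify first match).
def depAddKey (d : List (String × List String)) (k : String) : List (String × List String) :=
  if k ∈ d.map Prod.fst then d else d ++ [(k, [])]

def depAppendAt (d : List (String × List String)) (k : String) (n : String) : List (String × List String) :=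
  d.map (fun p => if p.1 = k then (p.1, if n ∈ p.2 then p.2 else p.2 ++ [n]) else p)

-- inner loop: `for dependant in graph[node]: …`
def depInner (node : String) (d : List (String × List String)) (deps : List String) : List (String × List String) :=
  deps.foldl (fun d dependant => depAppendAt (depAddKey d dependant) dependant node) d

def dependants_to_dependencies (graph : List (String × List String)) : List (String × List String) :=
  graph.foldl (fun d p => depInner p.1 (depAddKey d p.1) p.2) []

-- ===== PORT B =====
-- nodes = dict.fromkeys(n for node in graph for n in (node, *graph[node]))
def altAddIfNew (ks : List String) (t : String) : List String :=
  if t ∈ ks then ks else ks ++ [t]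

def dependants_to_dependencies_alt (graph : List (String × List String)) : List (String × List String) :=
  let nodes := graph.foldl (fun ks p => (p.1 :: p.2).foldl altAddIfNew ks) []
  nodes.map (fun target => (target, graph.filterMap (fun p => if target ∈ p.2 then some p.1 else none)))

-- ===== PRECONDITION & SPEC =====
-- A's parameter is a Python dict, whose keys are necessarily distinct; Pre_ excludes
-- association lists with duplicate keys, which do not represent any Python dict input.
def Pre_dependants_to_dependencies (graph : List (String × List String)) : Prop :=
  (graph.map Prod.fst).Nodup
instance (graph : List (String × List String)) : Decidable (Pre_dependants_to_dependencies graph) := by unfold Pre_dependants_to_dependencies; infer_instance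

def pvWitness_dependants_to_dependencies : (List (String × List String)) :=
  [("a", ["b", "c", "b"]), ("b", ["c"]), ("d", [])]

def Spec_dependants_to_dependencies (graph : List (String × List String)) (out : List (String × List String)) : Prop := out = dependants_to_dependencies_alt graph
instance (graph : List (String × List String)) (out : List (String × List String)) : Decidable (Spec_dependants_to_dependencies graph out) := by unfold Spec_dependants_to_dependencies; infer_instance

-- ===== CLAIM (what is proved, stated in full; the proofs are below) =====
def Claim_equal_dependants_to_dependencies : Prop := ∀ (graph : List (String × List String)), Dom_dependants_to_dependencies graph → Pre_dependants_to_dependencies graph → Spec_dependants_to_dependencies graph (dependants_to_dependencies graph)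

-- ===== LEMMAS AND PROOFS =====

-- the dependency list B computes for a target
def srcs (g : List (String × List String)) (t : String) : List String :=
  g.filterMap (fun p => if t ∈ p.2 then some p.1 else none)

-- new keys contributed by a list of names, given already-present keys ks
def newKeys : List String → List String → List String
  | [], _ => []
  | t :: rest, ks => if t ∈ ks then newKeys rest ks else t :: newKeys rest (ks ++ [t])

-- new keys contributed by a graph suffix
def emitKeys : List (String × List String) → List String → List String
  | [], _ => []
  | (n, deps) :: rest, ks =>
      let a := newKeys (n :: deps) ks
      a ++ emitKeys rest (ks ++ a)

theorem srcs_cons (n : String) (deps : List String) (rest : List (String × List String)) (t : String) :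
    srcs ((n, deps) :: rest) t = if t ∈ deps then n :: srcs rest t else srcs rest t := by
  simp only [srcs, List.filterMap_cons]
  split_ifs <;> rfl

theorem newKeys_sub {t : String} : ∀ {l ks : List String}, t ∈ newKeys l ks → t ∈ l := by
  intro l
  induction l with
  | nil => intro ks h; simp [newKeys] at h
  | cons a rest ih =>
    intro ks h
    simp only [newKeys] at h
    split_ifs at h with ha
    · exact List.mem_cons_of_mem _ (ih h)
    · rcases List.mem_cons.1 h with h | h
      · simp [h]
      · exact List.mem_cons_of_mem _ (ih h)

theorem newKeys_not_mem {t : String} : ∀ {l ks : List String}, t ∈ newKeys l ks → t ∉ ks := by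
  intro l
  induction l with
  | nil => intro ks h; simp [newKeys] at h
  | cons a rest ih =>
    intro ks h
    simp only [newKeys] at h
    split_ifs at h with ha
    · exact ih h
    · rcases List.mem_cons.1 h with h | h
      · subst h; exact ha
      · intro hk; exact ih h (List.mem_append_left _ hk)

theorem mem_append_newKeys {t : String} : ∀ {l ks : List String}, t ∈ l → t ∈ ks ++ newKeys l ks := by
  intro l
  induction l with
  | nil => intro ks h; simp at h
  | cons a rest ih =>
    intro ks h
    simp only [newKeys]
    split_ifs with ha
    · rcases List.mem_cons.1 h with h | h
      · subst h; exact List.mem_append_left _ ha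
      · exact ih h
    · rcases List.mem_cons.1 h with h | h
      · subst h; simp
      · have := ih (ks := ks ++ [a]) h
        simp only [List.append_assoc] at this ⊢
        rcases List.mem_append.1 this with h1 | h1
        · exact List.mem_append_left _ h1
        · refine List.mem_append_right _ ?_
          rcases List.mem_append.1 h1 with h2 | h2
          · simp at h2; simp [h2]
          · simp [h2]

theorem emitKeys_not_mem {t : String} : ∀ {g : List (String × List String)} {ks : List String},
    t ∈ emitKeys g ks → t ∉ ks := by
  intro g
  induction g with
  | nil => intro ks h; simp [emitKeys] at h
  | cons p rest ih =>
    intro ks h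
    obtain ⟨n, deps⟩ := p
    simp only [emitKeys] at h
    rcases List.mem_append.1 h with h | h
    · exact newKeys_not_mem h
    · intro hk; exact ih h (List.mem_append_left _ hk)

theorem keys_depAppendAt (d : List (String × List String)) (k n : String) :
    (depAppendAt d k n).map Prod.fst = d.map Prod.fst := by
  simp only [depAppendAt, List.map_map]
  refine List.map_congr_left ?_
  intro p _
  by_cases h : p.1 = k <;> simp [h]

-- effect of the inner loop of A, no side condition
theorem depInner_general (node : String) (deps : List String) :
    ∀ (d : List (String × List String)),
    depInner node d deps =
      d.map (fun p => (p.1, if p.1 ∈ deps ∧ node ∉ p.2 then p.2 ++ [node] else p.2))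
      ++ (newKeys deps (d.map Prod.fst)).map (fun t => (t, [node])) := by
  induction deps with
  | nil => intro d; simp [depInner, newKeys]
  | cons dep rest ih =>
    intro d
    have hstep : depInner node d (dep :: rest)
        = depInner node (depAppendAt (depAddKey d dep) dep node) rest := rfl
    rw [hstep]
    by_cases hk : dep ∈ d.map Prod.fst
    · -- existing key: depAddKey is the identity
      have h1 : depAddKey d dep = d := by simp [depAddKey, hk]
      rw [h1, ih]
      have hkeys : (depAppendAt d dep node).map Prod.fst = d.map Prod.fst :=
        keys_depAppendAt d dep node
      rw [hkeys]
      have hnk : newKeys (dep :: rest) (d.map Prod.fst) = newKeys rest (d.map Prod.fst) := by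
        simp [newKeys, hk]
      rw [hnk]
      congr 1
      simp only [depAppendAt, List.map_map]
      refine List.map_congr_left ?_
      intro p _
      by_cases hp : p.1 = dep
      · by_cases hn : node ∈ p.2
        · simp [hp, hn]
        · simp [hp, hn]
      · simp [hp]
    · -- new key: depAddKey appends (dep, []), the append makes it (dep, [node])
      have h1 : depAddKey d dep = d ++ [(dep, [])] := by simp [depAddKey, hk]
      have hfix : List.map (fun p : String × List String => if p.1 = dep then (p.1, if node ∈ p.2 then p.2 else p.2 ++ [node]) else p) d = d := by
        have hmap : List.map (fun p : String × List String => if p.1 = dep then (p.1, if node ∈ p.2 then p.2 else p.2 ++ [node]) else p) d = List.map id d := by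
          refine List.map_congr_left ?_
          intro p hp
          have hne : p.1 ≠ dep := by
            intro he; exact hk (he ▸ List.mem_map_of_mem hp)
          simp [hne]
        simpa using hmap
      have h2 : depAppendAt (d ++ [(dep, [])]) dep node = d ++ [(dep, [node])] := by
        simp only [depAppendAt, List.map_append, hfix, List.map_cons, List.map_nil]
        simp
      rw [h1, h2, ih]
      have hkeys : (d ++ [(dep, [node])]).map Prod.fst = d.map Prod.fst ++ [dep] := by simp
      rw [hkeys]
      have hnk : newKeys (dep :: rest) (d.map Prod.fst)
          = dep :: newKeys rest (d.map Prod.fst ++ [dep]) := by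
        simp [newKeys, hk]
      rw [hnk]
      simp only [List.map_append, List.map_cons, List.map_nil, List.append_assoc]
      congr 1
      · refine List.map_congr_left ?_
        intro p hp
        have hne : p.1 ≠ dep := by
          intro he; exact hk (he ▸ List.mem_map_of_mem hp)
        by_cases hr : p.1 ∈ rest <;> simp [hne, hr]
      · simp

theorem depInner_eq (node : String) (d : List (String × List String)) (deps : List String)
    (hnode : ∀ p ∈ d, node ∉ p.2) :
    depInner node d deps =
      d.map (fun p => (p.1, p.2 ++ if p.1 ∈ deps then [node] else []))
      ++ (newKeys deps (d.map Prod.fst)).map (fun t => (t, [node])) := by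
  rw [depInner_general]
  congr 1
  refine List.map_congr_left ?_
  intro p hp
  by_cases hr : p.1 ∈ deps <;> simp [hr, hnode p hp]

theorem runA_eq : ∀ (g d : List (String × List String)),
    (g.map Prod.fst).Nodup →
    (∀ p ∈ d, ∀ q ∈ g, q.1 ∉ p.2) →
    g.foldl (fun d p => depInner p.1 (depAddKey d p.1) p.2) d =
      d.map (fun p => (p.1, p.2 ++ srcs g p.1))
      ++ (emitKeys g (d.map Prod.fst)).map (fun t => (t, srcs g t)) := by
  intro g
  induction g with
  | nil => intro d _ _; simp [srcs, emitKeys]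
  | cons q rest ih =>
    intro d hg hdisj
    obtain ⟨n, deps⟩ := q
    have hn_rest : n ∉ rest.map Prod.fst := by
      simp only [List.map_cons, List.nodup_cons] at hg; exact hg.1
    have hg_rest : (rest.map Prod.fst).Nodup := by
      simp only [List.map_cons, List.nodup_cons] at hg; exact hg.2
    have hdisj' : ∀ p ∈ d, n ∉ p.2 := fun p hp => hdisj p hp (n, deps) List.mem_cons_self
    have hemit : emitKeys ((n, deps) :: rest) (d.map Prod.fst)
        = newKeys (n :: deps) (d.map Prod.fst)
          ++ emitKeys rest (d.map Prod.fst ++ newKeys (n :: deps) (d.map Prod.fst)) := rfl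
    by_cases hk : n ∈ d.map Prod.fst
    · -- n already a key of the accumulator
      have h1 : depAddKey d n = d := by simp [depAddKey, hk]
      have h2 := depInner_eq n d deps hdisj'
      have hstep : (((n, deps) :: rest).foldl (fun d p => depInner p.1 (depAddKey d p.1) p.2) d)
          = rest.foldl (fun d p => depInner p.1 (depAddKey d p.1) p.2) (depInner n d deps) := by
        simp [List.foldl_cons, h1]
      have hdisj2 : ∀ p ∈ (d.map fun p => (p.1, p.2 ++ if p.1 ∈ deps then [n] else []))
          ++ (newKeys deps (d.map Prod.fst)).map (fun t => (t, [n])),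
          ∀ q ∈ rest, q.1 ∉ p.2 := by
        intro p hp q hq
        have hqn : q.1 ≠ n := by
          intro he; exact hn_rest (he ▸ List.mem_map_of_mem hq)
        rcases List.mem_append.1 hp with hp | hp
        · obtain ⟨p0, hp0, rfl⟩ := List.mem_map.1 hp
          intro hmem
          rcases List.mem_append.1 hmem with hm | hm
          · exact hdisj p0 hp0 q (List.mem_cons_of_mem _ hq) hm
          · split_ifs at hm with _
            · exact hqn (List.mem_singleton.1 hm)
            · simp at hm
        · obtain ⟨t, ht, rfl⟩ := List.mem_map.1 hp
          intro hmem
          exact hqn (List.mem_singleton.1 hmem)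
      have hkeys2 : ((d.map fun p => (p.1, p.2 ++ if p.1 ∈ deps then [n] else []))
          ++ (newKeys deps (d.map Prod.fst)).map (fun t => (t, [n]))).map Prod.fst
          = d.map Prod.fst ++ newKeys deps (d.map Prod.fst) := by
        simp [List.map_append, List.map_map, Function.comp_def]
      rw [hstep, h2, ih _ hg_rest hdisj2, hkeys2, hemit]
      have hnk : newKeys (n :: deps) (d.map Prod.fst) = newKeys deps (d.map Prod.fst) := by
        simp [newKeys, hk]
      rw [hnk]
      have e1 : (d.map fun p => (p.1, p.2 ++ if p.1 ∈ deps then [n] else [])).map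
            (fun p => (p.1, p.2 ++ srcs rest p.1))
          = d.map (fun p => (p.1, p.2 ++ srcs ((n, deps) :: rest) p.1)) := by
        rw [List.map_map]
        refine List.map_congr_left ?_
        intro p _
        by_cases hp : p.1 ∈ deps <;> simp [hp, srcs_cons]
      have e2 : ((newKeys deps (d.map Prod.fst)).map (fun t => (t, [n]))).map
            (fun p => (p.1, p.2 ++ srcs rest p.1))
          = (newKeys deps (d.map Prod.fst)).map (fun t => (t, srcs ((n, deps) :: rest) t)) := by
        rw [List.map_map]
        refine List.map_congr_left ?_
        intro t ht
        simp [srcs_cons, newKeys_sub ht]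
      have e3 : (emitKeys rest (d.map Prod.fst ++ newKeys deps (d.map Prod.fst))).map
            (fun t => (t, srcs rest t))
          = (emitKeys rest (d.map Prod.fst ++ newKeys deps (d.map Prod.fst))).map
            (fun t => (t, srcs ((n, deps) :: rest) t)) := by
        refine List.map_congr_left ?_
        intro t ht
        have h1 := emitKeys_not_mem ht
        have h2 : t ∉ deps := fun hd => h1 (mem_append_newKeys hd)
        simp [srcs_cons, h2]
      simp only [List.map_append, e1, e2, e3, List.append_assoc]
    · -- n is a fresh key
      have h1 : depAddKey d n = d ++ [(n, [])] := by simp [depAddKey, hk]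
      have hnode1 : ∀ p ∈ depAddKey d n, n ∉ p.2 := by
        rw [h1]
        intro p hp
        rcases List.mem_append.1 hp with hp | hp
        · exact hdisj' p hp
        · rw [List.mem_singleton.1 hp]; simp
      have h2 := depInner_eq n (depAddKey d n) deps hnode1
      have hstep : (((n, deps) :: rest).foldl (fun d p => depInner p.1 (depAddKey d p.1) p.2) d)
          = rest.foldl (fun d p => depInner p.1 (depAddKey d p.1) p.2)
              (depInner n (depAddKey d n) deps) := rfl
      have hdisj2 : ∀ p ∈ ((depAddKey d n).map fun p => (p.1, p.2 ++ if p.1 ∈ deps then [n] else []))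
          ++ (newKeys deps ((depAddKey d n).map Prod.fst)).map (fun t => (t, [n])),
          ∀ q ∈ rest, q.1 ∉ p.2 := by
        rw [h1]
        intro p hp q hq
        have hqn : q.1 ≠ n := by
          intro he; exact hn_rest (he ▸ List.mem_map_of_mem hq)
        rcases List.mem_append.1 hp with hp | hp
        · obtain ⟨p0, hp0, rfl⟩ := List.mem_map.1 hp
          intro hmem
          rcases List.mem_append.1 hmem with hm | hm
          · rcases List.mem_append.1 hp0 with hp0 | hp0
            · exact hdisj p0 hp0 q (List.mem_cons_of_mem _ hq) hm
            · rw [List.mem_singleton.1 hp0] at hm; simp at hm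
          · split_ifs at hm with _
            · exact hqn (List.mem_singleton.1 hm)
            · simp at hm
        · obtain ⟨t, ht, rfl⟩ := List.mem_map.1 hp
          intro hmem
          exact hqn (List.mem_singleton.1 hmem)
      have hkeys2 : (((depAddKey d n).map fun p => (p.1, p.2 ++ if p.1 ∈ deps then [n] else []))
          ++ (newKeys deps ((depAddKey d n).map Prod.fst)).map (fun t => (t, [n]))).map Prod.fst
          = (d.map Prod.fst ++ [n]) ++ newKeys deps (d.map Prod.fst ++ [n]) := by
        rw [h1]
        simp [List.map_append, List.map_map, Function.comp_def]
      rw [hstep, h2, ih _ hg_rest hdisj2, hkeys2, hemit]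
      have hnk : newKeys (n :: deps) (d.map Prod.fst)
          = n :: newKeys deps (d.map Prod.fst ++ [n]) := by
        simp [newKeys, hk]
      rw [hnk, h1]
      have harg : d.map Prod.fst ++ n :: newKeys deps (d.map Prod.fst ++ [n])
          = (d.map Prod.fst ++ [n]) ++ newKeys deps (d.map Prod.fst ++ [n]) := by simp
      rw [harg]
      have e1 : (d.map fun p => (p.1, p.2 ++ if p.1 ∈ deps then [n] else [])).map
            (fun p => (p.1, p.2 ++ srcs rest p.1))
          = d.map (fun p => (p.1, p.2 ++ srcs ((n, deps) :: rest) p.1)) := by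
        rw [List.map_map]
        refine List.map_congr_left ?_
        intro p _
        by_cases hp : p.1 ∈ deps <;> simp [hp, srcs_cons]
      have e2 : ((newKeys deps (d.map Prod.fst ++ [n])).map (fun t => (t, [n]))).map
            (fun p => (p.1, p.2 ++ srcs rest p.1))
          = (newKeys deps (d.map Prod.fst ++ [n])).map
            (fun t => (t, srcs ((n, deps) :: rest) t)) := by
        rw [List.map_map]
        refine List.map_congr_left ?_
        intro t ht
        simp [srcs_cons, newKeys_sub ht]
      have e3 : (emitKeys rest ((d.map Prod.fst ++ [n]) ++ newKeys deps (d.map Prod.fst ++ [n]))).map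
            (fun t => (t, srcs rest t))
          = (emitKeys rest ((d.map Prod.fst ++ [n]) ++ newKeys deps (d.map Prod.fst ++ [n]))).map
            (fun t => (t, srcs ((n, deps) :: rest) t)) := by
        refine List.map_congr_left ?_
        intro t ht
        have h1' := emitKeys_not_mem ht
        have h2' : t ∉ deps := by
          intro hd
          exact h1' (mem_append_newKeys (ks := d.map Prod.fst ++ [n]) hd)
        simp [srcs_cons, h2']
      have hfin : ∀ a ∈ emitKeys rest
          (List.map Prod.fst d ++ n :: newKeys deps (List.map Prod.fst d ++ [n])), a ∉ deps := by
        intro a ha hd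
        have hmem := mem_append_newKeys (ks := List.map Prod.fst d ++ [n]) hd
        simp only [List.append_assoc, List.singleton_append] at hmem
        exact emitKeys_not_mem ha hmem
      by_cases hp : n ∈ deps <;>
        · simp only [List.map_append, List.map_cons, List.map_nil, e1, e2, e3,
            List.append_assoc, List.cons_append, List.nil_append, List.singleton_append]
          simp [hp, srcs_cons, List.append_assoc]
          exact hfin

theorem foldl_addIfNew (l ks : List String) :
    l.foldl altAddIfNew ks = ks ++ newKeys l ks := by
  induction l generalizing ks with
  | nil => simp [newKeys]
  | cons t rest ih =>
    simp only [List.foldl_cons, altAddIfNew, newKeys]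
    split_ifs with h
    · simp [ih]
    · rw [ih]; simp

theorem foldB_eq : ∀ (g : List (String × List String)) (ks : List String),
    g.foldl (fun ks p => (p.1 :: p.2).foldl altAddIfNew ks) ks = ks ++ emitKeys g ks := by
  intro g
  induction g with
  | nil => intro ks; simp [emitKeys]
  | cons p rest ih =>
    intro ks
    obtain ⟨n, deps⟩ := p
    have hstep : ((n, deps) :: rest).foldl (fun ks p => (p.1 :: p.2).foldl altAddIfNew ks) ks
        = rest.foldl (fun ks p => (p.1 :: p.2).foldl altAddIfNew ks)
            ((n :: deps).foldl altAddIfNew ks) := rfl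
    rw [hstep, foldl_addIfNew (n :: deps) ks, ih]
    simp [emitKeys, List.append_assoc]

-- ===== VERDICT (by name: the statement is the Claim_ definition above) =====
theorem dependants_to_dependencies_spec : Claim_equal_dependants_to_dependencies := by
  intro g _ hpre
  unfold Spec_dependants_to_dependencies dependants_to_dependencies dependants_to_dependencies_alt
  rw [runA_eq g [] hpre (by simp)]
  simp only [List.map_nil, List.nil_append]
  rw [foldB_eq g []]
  simp [srcs]
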